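-- pv_equiv track=rewrite | github.com/hey-watchme/app-android-zero-touch | backend/services/workspace_registry.py | _make_project_key
-- ===== SOURCE A (Python) =====
-- from typing import Any, Dict, List, Optional
--
-- def _normalize_text(value: Any) -> Optional[str]:
--     if value is None:
--         return None
--     text = str(value).strip()
--     return text or None
--
-- def _make_project_key(value: Any) -> Optional[str]:
--     text = _normalize_text(value)
--     if not text:
--         return None
--
--     chars: List[str] = []
--     previous_was_sep = False
--     for raw_char in text.casefold():
--         if raw_char.isalnum():
--             chars.append(raw_char)
--             previous_was_sep = False
--             continue
--         if raw_char in {" ", "-", "_", "/", "&", ":"}: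
--             if not previous_was_sep:
--                 chars.append("-")
--                 previous_was_sep = True
--             continue
--
--     key = "".join(chars).strip("-")
--     return key or None
-- ===== SOURCE B (Python) =====
-- from typing import Any, Dict, List, Optional
--
-- _SEPS = {" ", "-", "_", "/", "&", ":"}
--
-- def _make_project_key(value: Any) -> Optional[str]:
--     # Two-phase index scanner: keep only alnum/separator chars, then walk an
--     # index over the kept list, skipping separators and slicing out each
--     # maximal alnum run as a token; join the tokens with dashes.
--     if value is None:
--         return None
--     kept = [c for c in str(value).strip().casefold() if c.isalnum() or c in _SEPS]
--     tokens: List[str] = []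
--     i, n = 0, len(kept)
--     while i < n:
--         if kept[i] in _SEPS:
--             i += 1
--         else:
--             j = i
--             while j < n and kept[j] not in _SEPS:
--                 j += 1
--             tokens.append("".join(kept[i:j]))
--             i = j
--     return "-".join(tokens) or None
-- ===== Notes on version B (the rewrite author's own statement) =====
-- stated objective: alternative
-- what changed: Replaces A's single-pass previous_was_sep state machine (append chars and dashes while tracking a flag, then strip edge dashes) with a two-phase index scanner: a filter keeps only alnum/separator characters, then an index walk skips separators and slices out each maximal alnum run as a token, joining the tokens with dashes.
import Mathlib
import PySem

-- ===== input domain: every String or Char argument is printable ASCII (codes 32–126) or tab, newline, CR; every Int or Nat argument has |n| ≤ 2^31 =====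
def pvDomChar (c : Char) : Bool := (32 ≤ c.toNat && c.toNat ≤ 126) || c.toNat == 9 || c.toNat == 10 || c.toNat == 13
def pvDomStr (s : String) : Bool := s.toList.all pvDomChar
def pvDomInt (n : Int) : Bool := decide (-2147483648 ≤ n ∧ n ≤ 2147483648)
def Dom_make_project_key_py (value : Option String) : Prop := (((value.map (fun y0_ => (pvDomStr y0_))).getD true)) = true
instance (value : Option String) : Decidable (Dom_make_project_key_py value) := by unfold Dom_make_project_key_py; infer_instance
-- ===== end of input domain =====

-- B replaces A's single-pass previous_was_sep state machine by a two-phase index scanner: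
-- filter to alnum/separator chars, then slice out maximal alnum runs as tokens and join with
-- dashes (no flag state, no edge-dash stripping): an alternative decomposition, same cost.

-- ===== PORT A =====
-- A's helper _normalize_text (None, or the stripped nonempty text as chars)
def normChars (value : Option String) : Option (List Char) :=
  match value with
  | none => none
  | some s =>
    let t := PySem.Chars.strip s.toList
    if t = [] then none else some t

-- A's separator set {" ", "-", "_", "/", "&", ":"}
def sepChar (c : Char) : Bool :=
  c == ' ' || c == '-' || c == '_' || c == '/' || c == '&' || c == ':'

-- one iteration of A's loop: state = (chars, previous_was_sep)
def aStep (st : List Char × Bool) (c : Char) : List Char × Bool :=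
  if PySem.Chars.isalnum c then (st.1 ++ [c], false)
  else if sepChar c then (if st.2 then st else (st.1 ++ ['-'], true))
  else st

def make_project_key_py (value : Option String) : Option String :=
  match normChars value with
  | none => none
  | some t =>
    let st := (PySem.Chars.lower t).foldl aStep ([], false)
    let key := PySem.Chars.stripChars st.1 ['-']
    if key = [] then none else some (String.mk key)

-- ===== PORT B =====
-- Source B's _SEPS
def bSeps : List Char := [' ', '-', '_', '/', '&', ':']

-- Source B's outer while loop over the index i, as structural recursion on the suffix kept[i:];
-- the inner while that advances j to the end of the run is the takeWhile/dropWhile pair.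
def bTokens : List Char → List (List Char)
  | [] => []
  | c :: cs =>
    if bSeps.contains c then bTokens cs
    else (c :: cs.takeWhile (fun x => !bSeps.contains x)) ::
         bTokens (cs.dropWhile (fun x => !bSeps.contains x))
  termination_by l => l.length
  decreasing_by
    · simp
    · simpa using Nat.lt_succ_of_le (List.Sublist.length_le (List.dropWhile_sublist _))

def make_project_key_py_alt (value : Option String) : Option String :=
  match value with
  | none => none
  | some s =>
    let kept := (PySem.Chars.lower (PySem.Chars.strip s.toList)).filter
        (fun c => PySem.Chars.isalnum c || bSeps.contains c)
    let key := PySem.Chars.join ['-'] (bTokens kept)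
    if key = [] then none else some (String.mk key)

-- ===== PRECONDITION & SPEC =====
def Spec_make_project_key_py (value : Option String) (out : Option String) : Prop := out = make_project_key_py_alt value
instance (value : Option String) (out : Option String) : Decidable (Spec_make_project_key_py value out) := by unfold Spec_make_project_key_py; infer_instance

-- ===== CLAIM (what is proved, stated in full; the proofs are below) =====
def Claim_equal_make_project_key_py : Prop := ∀ (value : Option String), Dom_make_project_key_py value → Spec_make_project_key_py value (make_project_key_py value)

-- ===== LEMMAS AND PROOFS =====

def keepC (c : Char) : Bool := PySem.Chars.isalnum c || sepChar c

def dashP : Char → Bool := fun c => (['-'] : List Char).contains c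

-- A's loop as a structural recursion on the text
def aRun : List Char → Bool → List Char
  | [], _ => []
  | c :: cs, prev =>
    if PySem.Chars.isalnum c then c :: aRun cs false
    else if sepChar c then (if prev then aRun cs prev else '-' :: aRun cs true)
    else aRun cs prev

-- accumulator-style tokenizer (bridge between aRun and bTokens)
def bFin : List Char → List Char → List (List Char)
  | cur, [] => if cur = [] then [] else [cur.reverse]
  | cur, c :: cs =>
    if sepChar c then (if cur = [] then bFin [] cs else cur.reverse :: bFin [] cs)
    else bFin (c :: cur) cs

def rstripD (x : List Char) : List Char := (x.reverse.dropWhile dashP).reverse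

lemma contains_eq_sep (c : Char) : bSeps.contains c = sepChar c := by
  rw [Bool.eq_iff_iff]
  simp [bSeps, sepChar, or_assoc]

lemma alnum_not_sep (c : Char) (h : PySem.Chars.isalnum c = true) : sepChar c = false := by
  simp only [sepChar, Bool.or_eq_false_iff, beq_eq_false_iff_ne, ne_eq]
  refine ⟨⟨⟨⟨⟨?_, ?_⟩, ?_⟩, ?_⟩, ?_⟩, ?_⟩ <;> rintro rfl <;> exact absurd h (by decide)

lemma alnum_not_dash (c : Char) (h : PySem.Chars.isalnum c = true) : dashP c = false := by
  simp only [dashP, List.contains_eq_mem, List.mem_singleton, decide_eq_false_iff_not]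
  rintro rfl; exact absurd h (by decide)

lemma foldl_aStep (cs : List Char) :
    ∀ acc prev, (cs.foldl aStep (acc, prev)).1 = acc ++ aRun cs prev := by
  induction cs with
  | nil => intro acc prev; simp [aRun]
  | cons c cs ih =>
    intro acc prev
    simp only [List.foldl_cons, aStep, aRun]
    by_cases h1 : PySem.Chars.isalnum c = true
    · simp [h1, ih]
    · by_cases h2 : sepChar c = true
      · by_cases h3 : prev <;> simp [h1, h2, h3, ih]
      · simp [h1, h2, ih]

lemma aRun_filter (cs : List Char) : ∀ prev, aRun cs prev = aRun (cs.filter keepC) prev := by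
  induction cs with
  | nil => intro prev; simp
  | cons c cs ih =>
    intro prev
    by_cases h1 : PySem.Chars.isalnum c = true
    · simp [aRun, List.filter_cons, keepC, h1, ih]
    · by_cases h2 : sepChar c = true
      · by_cases h3 : prev <;> simp [aRun, List.filter_cons, keepC, h1, h2, h3, ih]
      · simp [aRun, List.filter_cons, keepC, h1, h2, ih]

lemma bFin_ne_nil (ds : List Char) : ∀ cur, cur ≠ [] → bFin cur ds ≠ [] := by
  induction ds with
  | nil => intro cur h; simp [bFin, h]
  | cons c cs ih =>
    intro cur h
    by_cases h2 : sepChar c = true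
    · simp [bFin, h2, h]
    · simpa [bFin, h2] using ih (c :: cur) (by simp)

lemma bFin_dropWhile (ds : List Char) : bFin [] ds = bFin [] (ds.dropWhile sepChar) := by
  induction ds with
  | nil => simp
  | cons c cs ih =>
    by_cases h2 : sepChar c = true
    · simpa [bFin, h2, List.dropWhile_cons, reduceCtorEq] using ih
    · simp [List.dropWhile_cons, h2]

lemma aRun_true (cs : List Char) (hk : ∀ c ∈ cs, keepC c = true) :
    aRun cs true = aRun (cs.dropWhile sepChar) false := by
  induction cs with
  | nil => simp [aRun]
  | cons c cs ih =>
    have hc : keepC c = true := hk c (List.mem_cons_self ..)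
    have hcs : ∀ x ∈ cs, keepC x = true := fun x hx => hk x (List.mem_cons_of_mem _ hx)
    by_cases h1 : PySem.Chars.isalnum c = true
    · have hsep : sepChar c = false := alnum_not_sep c h1
      simp [aRun, h1, List.dropWhile_cons, hsep]
    · have h2 : sepChar c = true := by
        cases hor : sepChar c
        · simp [keepC, h1, hor] at hc
        · rfl
      simpa [aRun, h1, h2, List.dropWhile_cons] using ih hcs

lemma dropWhile_head_false {p : Char → Bool} (l : List Char) (a : Char) (as : List Char)
    (h : l.dropWhile p = a :: as) : p a = false := by
  induction l with
  | nil => simp at h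
  | cons x xs ih =>
    rw [List.dropWhile_cons] at h
    by_cases hx : p x = true
    · rw [if_pos hx] at h; exact ih h
    · rw [if_neg hx] at h
      cases h; simpa using hx

lemma mem_dropWhile {p : Char → Bool} {l : List Char} {x : Char}
    (h : x ∈ l.dropWhile p) : x ∈ l := (List.dropWhile_sublist p).mem h

lemma alnum_of_keep_not_sep {c : Char} (hk : keepC c = true) (hs : sepChar c = false) :
    PySem.Chars.isalnum c = true := by
  simpa [keepC, hs] using hk

lemma dropDash_aRun (ds : List Char) (hk : ∀ c ∈ ds, keepC c = true) :
    (aRun ds false).dropWhile dashP = aRun (ds.dropWhile sepChar) false := by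
  induction ds with
  | nil => simp [aRun]
  | cons c cs ih =>
    have hc : keepC c = true := hk c (List.mem_cons_self ..)
    have hcs : ∀ x ∈ cs, keepC x = true := fun x hx => hk x (List.mem_cons_of_mem _ hx)
    by_cases h1 : PySem.Chars.isalnum c = true
    · have hsep : sepChar c = false := alnum_not_sep c h1
      have hd : dashP c = false := alnum_not_dash c h1
      simp [aRun, h1, List.dropWhile_cons, hsep, hd]
    · have h2 : sepChar c = true := by
        cases hor : sepChar c
        · simp [keepC, h1, hor] at hc
        · rfl
      have hdd : dashP '-' = true := by decide
      simp only [aRun, h1, Bool.false_eq_true, if_false, h2, if_true, List.dropWhile_cons, hdd]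
      rw [aRun_true cs hcs]
      rcases hcs' : cs.dropWhile sepChar with _ | ⟨a, rest⟩
      · simp [aRun]
      · have ha : PySem.Chars.isalnum a = true := by
          have hmem : a ∈ cs := mem_dropWhile (by rw [hcs']; exact List.mem_cons_self ..)
          exact alnum_of_keep_not_sep (hcs a hmem) (dropWhile_head_false cs a rest hcs')
        have hd : dashP a = false := alnum_not_dash a ha
        simp [aRun, ha, List.dropWhile_cons, hd]

lemma rstripD_cons_of (a : Char) (x : List Char) (h : dashP a = false) :
    rstripD (a :: x) = a :: rstripD x := by
  simp only [rstripD, List.reverse_cons, List.dropWhile_append]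
  split_ifs with he
  · have : x.reverse.dropWhile dashP = [] := by simpa [List.isEmpty_iff] using he
    simp [this, List.dropWhile_cons, h]
  · simp

lemma rstripD_dash (x : List Char) :
    rstripD ('-' :: x) = if rstripD x = [] then [] else '-' :: rstripD x := by
  have hdd : dashP '-' = true := by decide
  by_cases he : rstripD x = []
  · rw [if_pos he]
    have hdw : x.reverse.dropWhile dashP = [] := by
      have := congrArg List.reverse he
      simpa [rstripD] using this
    simp [rstripD, List.reverse_cons, List.dropWhile_append, hdw, List.dropWhile_cons, hdd]
  · rw [if_neg he]
    have hdw : x.reverse.dropWhile dashP ≠ [] := by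
      intro hh; exact he (by simp [rstripD, hh])
    simp [rstripD, List.reverse_cons, List.dropWhile_append, hdw]

lemma G_lemma (n : Nat) : ∀ ds : List Char, ds.length ≤ n → (∀ c ∈ ds, keepC c = true) →
    ∀ cur : List Char, cur ≠ [] →
      cur.reverse ++ rstripD (aRun ds false) = PySem.Chars.join ['-'] (bFin cur ds) := by
  induction n with
  | zero =>
    intro ds hlen _ cur hcur
    have : ds = [] := List.eq_nil_of_length_eq_zero (Nat.le_zero.mp hlen)
    subst this
    simp [aRun, rstripD, bFin, hcur, PySem.Chars.join, List.intercalate]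
  | succ n ih =>
    intro ds hlen hk cur hcur
    cases ds with
    | nil => simp [aRun, rstripD, bFin, hcur, PySem.Chars.join, List.intercalate]
    | cons c cs =>
      have hc : keepC c = true := hk c (List.mem_cons_self ..)
      have hcs : ∀ x ∈ cs, keepC x = true := fun x hx => hk x (List.mem_cons_of_mem _ hx)
      have hlen' : cs.length ≤ n := by simpa using Nat.lt_succ_iff.mp (by simpa using hlen)
      by_cases h1 : PySem.Chars.isalnum c = true
      · have hsep : sepChar c = false := alnum_not_sep c h1
        have hd : dashP c = false := alnum_not_dash c h1
        simp only [aRun, h1, if_true, bFin, hsep, Bool.false_eq_true, if_false,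
          rstripD_cons_of c _ hd]
        rw [← ih cs hlen' hcs (c :: cur) (by simp)]
        simp
      · have h2 : sepChar c = true := by
          cases hor : sepChar c
          · simp [keepC, h1, hor] at hc
          · rfl
        simp only [aRun, h1, Bool.false_eq_true, if_false, h2, if_true, bFin, hcur]
        rw [aRun_true cs hcs, rstripD_dash]
        have hk' : ∀ x ∈ cs.dropWhile sepChar, keepC x = true :=
          fun x hx => hcs x (mem_dropWhile hx)
        have hlen'' : (cs.dropWhile sepChar).length ≤ n :=
          le_trans (List.Sublist.length_le (List.dropWhile_sublist _)) hlen'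
        rcases hcs' : cs.dropWhile sepChar with _ | ⟨a, rest⟩
        · have hb : bFin [] cs = [] := by rw [bFin_dropWhile, hcs']; simp [bFin]
          simp [aRun, rstripD, hb, PySem.Chars.join, List.intercalate]
        · have ha : PySem.Chars.isalnum a = true := by
            have hmem : a ∈ cs := mem_dropWhile (by rw [hcs']; exact List.mem_cons_self ..)
            exact alnum_of_keep_not_sep (hcs a hmem) (dropWhile_head_false cs a rest hcs')
          have hd : dashP a = false := alnum_not_dash a ha
          have hrest : ∀ x ∈ rest, keepC x = true := by
            intro x hx
            exact hk' x (by rw [hcs']; exact List.mem_cons_of_mem _ hx)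
          have hlenr : rest.length ≤ n := by
            have := hlen''; rw [hcs'] at this; simpa using Nat.le_of_succ_le this
          have hIH := ih rest hlenr hrest [a] (by simp)
          rw [hcs'] at hk'
          rw [bFin_dropWhile cs, hcs']
          simp only [aRun, ha, if_true, rstripD_cons_of a _ hd]
          have hne : a :: rstripD (aRun rest false) ≠ [] := by simp
          rw [if_neg (by simp)]
          have hbne : bFin [a] rest ≠ [] := bFin_ne_nil rest [a] (by simp)
          have hb : bFin [] (a :: rest) = bFin [a] rest := by
            simp [bFin, alnum_not_sep a ha]
          rw [hb]
          rcases hbf : bFin [a] rest with _ | ⟨w, ws⟩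
          · exact absurd hbf hbne
          · have hj : PySem.Chars.join ['-'] (cur.reverse :: w :: ws) =
                cur.reverse ++ '-' :: PySem.Chars.join ['-'] (w :: ws) := by
              rw [PySem.Chars.join_cons_cons]; simp
            rw [hj, ← hbf, ← hIH]
            simp

lemma M_lemma (ds : List Char) (hk : ∀ c ∈ ds, keepC c = true) :
    PySem.Chars.stripChars (aRun ds false) ['-'] =
      PySem.Chars.join ['-'] (bFin [] ds) := by
  have hstrip : PySem.Chars.stripChars (aRun ds false) ['-'] =
      rstripD ((aRun ds false).dropWhile dashP) := rfl
  rw [hstrip, dropDash_aRun ds hk, bFin_dropWhile]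
  have hk' : ∀ x ∈ ds.dropWhile sepChar, keepC x = true :=
    fun x hx => hk x (mem_dropWhile hx)
  rcases hds : ds.dropWhile sepChar with _ | ⟨a, rest⟩
  · simp [aRun, rstripD, bFin, PySem.Chars.join, List.intercalate]
  · have ha : PySem.Chars.isalnum a = true := by
      have hmem : a ∈ ds := mem_dropWhile (by rw [hds]; exact List.mem_cons_self ..)
      exact alnum_of_keep_not_sep (hk a hmem) (dropWhile_head_false ds a rest hds)
    have hd : dashP a = false := alnum_not_dash a ha
    have hrest : ∀ x ∈ rest, keepC x = true := by
      intro x hx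
      rw [hds] at hk'
      exact hk' x (List.mem_cons_of_mem _ hx)
    have hIH := G_lemma rest.length rest le_rfl hrest [a] (by simp)
    have hb : bFin [] (a :: rest) = bFin [a] rest := by
      simp [bFin, alnum_not_sep a ha]
    simp only [aRun, ha, if_true, rstripD_cons_of a _ hd, hb]
    simpa using hIH

lemma takeWhile_append_of_all {p : Char → Bool} (l r : List Char)
    (h : ∀ c ∈ l, p c = true) : (l ++ r).takeWhile p = l ++ r.takeWhile p := by
  induction l with
  | nil => simp
  | cons x xs ih =>
    have hx : p x = true := h x (List.mem_cons_self ..)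
    simp only [List.cons_append, List.takeWhile_cons, hx, if_true]
    rw [ih (fun c hc => h c (List.mem_cons_of_mem _ hc))]

lemma dropWhile_append_of_all {p : Char → Bool} (l r : List Char)
    (h : ∀ c ∈ l, p c = true) : (l ++ r).dropWhile p = r.dropWhile p := by
  induction l with
  | nil => simp
  | cons x xs ih =>
    have hx : p x = true := h x (List.mem_cons_self ..)
    simp only [List.cons_append, List.dropWhile_cons, hx, if_true]
    exact ih (fun c hc => h c (List.mem_cons_of_mem _ hc))

lemma bTokens_all_nonsep (l : List Char) (h : ∀ c ∈ l, sepChar c = false) (hne : l ≠ []) :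
    bTokens l = [l] := by
  cases l with
  | nil => exact absurd rfl hne
  | cons a rest =>
    have ha : bSeps.contains a = false := by
      rw [contains_eq_sep]; exact h a (List.mem_cons_self ..)
    have hrest : ∀ c ∈ rest, sepChar c = false := fun c hc => h c (List.mem_cons_of_mem _ hc)
    have htw : rest.takeWhile (fun x => !bSeps.contains x) = rest := by
      rw [List.takeWhile_eq_self_iff.mpr]
      intro c hc
      show (!bSeps.contains c) = true
      rw [contains_eq_sep, hrest c hc]; rfl
    have hdw : rest.dropWhile (fun x => !bSeps.contains x) = [] := by
      rw [List.dropWhile_eq_nil_iff.mpr]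
      intro c hc
      show (!bSeps.contains c) = true
      rw [contains_eq_sep, hrest c hc]; rfl
    simp only [bTokens, ha, Bool.false_eq_true, if_false, htw, hdw]

lemma bTokens_nonsep_prefix (l : List Char) (c : Char) (cs : List Char)
    (hl : ∀ d ∈ l, sepChar d = false) (hlne : l ≠ []) (hc : sepChar c = true) :
    bTokens (l ++ c :: cs) = l :: bTokens cs := by
  cases l with
  | nil => exact absurd rfl hlne
  | cons a rest =>
    have ha : bSeps.contains a = false := by
      rw [contains_eq_sep]; exact hl a (List.mem_cons_self ..)
    have hcc : bSeps.contains c = true := by rw [contains_eq_sep]; exact hc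
    have hrest : ∀ d ∈ rest, sepChar d = false := fun d hd => hl d (List.mem_cons_of_mem _ hd)
    have hall : ∀ d ∈ rest, (!bSeps.contains d) = true := by
      intro d hd
      show (!bSeps.contains d) = true
      rw [contains_eq_sep, hrest d hd]; rfl
    have htw : (rest ++ c :: cs).takeWhile (fun x => !bSeps.contains x) = rest := by
      rw [takeWhile_append_of_all rest (c :: cs) hall, List.takeWhile_cons]
      simp only [hcc, Bool.not_true, Bool.false_eq_true, if_false, List.append_nil]
    have hdw : (rest ++ c :: cs).dropWhile (fun x => !bSeps.contains x) = c :: cs := by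
      rw [dropWhile_append_of_all rest (c :: cs) hall, List.dropWhile_cons]
      simp only [hcc, Bool.not_true, Bool.false_eq_true, if_false]
    have hts : bTokens (c :: cs) = bTokens cs := by
      simp only [bTokens, hcc, if_true]
    simp only [List.cons_append, bTokens, ha, Bool.false_eq_true, if_false, htw, hdw, hts]

lemma bFin_eq_bTokens : ∀ (ds cur : List Char), (∀ c ∈ cur, sepChar c = false) →
    bFin cur ds = bTokens (cur.reverse ++ ds) := by
  intro ds
  induction ds with
  | nil =>
    intro cur hcur
    by_cases hcn : cur = []
    · subst hcn; simp [bFin, bTokens]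
    · have ht : bTokens cur.reverse = [cur.reverse] :=
        bTokens_all_nonsep _ (fun c hc => hcur c (List.mem_reverse.mp hc)) (by simp [hcn])
      simp only [bFin, if_neg hcn, List.append_nil, ht]
  | cons c cs ih =>
    intro cur hcur
    by_cases h2 : sepChar c = true
    · by_cases hcn : cur = []
      · subst hcn
        have hcc : bSeps.contains c = true := by rw [contains_eq_sep]; exact h2
        have hts : bTokens (c :: cs) = bTokens cs := by
          simp only [bTokens, hcc, if_true]
        simp only [bFin, h2, if_true, if_pos rfl, List.reverse_nil, List.nil_append, hts]
        simpa using ih [] (by simp)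
      · have hpre := bTokens_nonsep_prefix cur.reverse c cs
          (fun d hd => hcur d (List.mem_reverse.mp hd)) (by simp [hcn]) h2
        simp only [bFin, h2, if_true, if_neg hcn, hpre]
        rw [show bFin [] cs = bTokens cs by simpa using ih [] (by simp)]
    · have := ih (c :: cur) (by
        intro d hdm
        rcases List.mem_cons.mp hdm with rfl | hdm'
        · simpa using h2
        · exact hcur d hdm')
      simp only [bFin, h2, Bool.false_eq_true, if_false, this, List.reverse_cons]
      simp

lemma tokens_eq (ds : List Char) : bFin [] ds = bTokens ds := by
  simpa using bFin_eq_bTokens ds [] (by simp)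

lemma key_eq (t : List Char) :
    PySem.Chars.stripChars ((PySem.Chars.lower t).foldl aStep ([], false)).1 ['-'] =
      PySem.Chars.join ['-']
        (bTokens ((PySem.Chars.lower t).filter (fun c => PySem.Chars.isalnum c || bSeps.contains c))) := by
  set lt := PySem.Chars.lower t with hlt
  have hA : ((lt.foldl aStep ([], false)).1) = aRun lt false := by
    simpa using foldl_aStep lt [] false
  have hfe : lt.filter (fun c => PySem.Chars.isalnum c || bSeps.contains c) = lt.filter keepC := by
    apply List.filter_congr
    intro c _; rw [contains_eq_sep]; rfl
  have hkeep : ∀ c ∈ lt.filter keepC, keepC c = true := by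
    intro c hc; exact (List.mem_filter.mp hc).2
  rw [hA, aRun_filter lt false, M_lemma _ hkeep, hfe, tokens_eq]

-- ===== VERDICT (by name: the statement is the Claim_ definition above) =====
theorem make_project_key_py_spec : Claim_equal_make_project_key_py := by
  intro value _
  unfold Spec_make_project_key_py make_project_key_py make_project_key_py_alt normChars
  cases value with
  | none => rfl
  | some s =>
    by_cases ht : PySem.Chars.strip s.toList = []
    · simp only [ht, if_pos rfl]
      have : PySem.Chars.lower ([] : List Char) = [] := rfl
      simp [this, bTokens, PySem.Chars.join, List.intercalate]
    · simp only [ht, if_false]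
      exact (key_eq (PySem.Chars.strip s.toList)) ▸ rfl
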